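-- pv_equiv track=rewrite | github.com/PachecoCristian/RollApp | swade_code.py | cambiar_avance
-- ===== SOURCE A (Python) =====
-- def cambiar_avance(archivo, n_avances=0):
--     n_linea= 0
--     i=0
--     # Encontrar la linea en la que comienza el codigo de cambiar el Rango
--     for i in range(len(archivo)):
--         if archivo[i].strip().startswith("function getRankFromAdvance"):
--             n_linea= i
--             break
--         i+=1
--     # Cambiar el codigo, linea por linea
--     if n_linea != 0:
--         if n_avances!=0:
--         # function getRankFromAdvance(advance)
--         # if (advance <= 3) {
--             archivo[i+1]= "    if (advance <= "+str(n_avances)+") { \n"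
--         # return constants.RANK.NOVICE;
--         # }
--         # else if (advance.between(4, 7)) {
--             archivo[i+4]= "    else if (advance.between("+str(n_avances + 1)+", "+str(n_avances*2 )+")) { \n"
--         # return constants.RANK.SEASONED;
--         # }
--         # else if (advance.between(8, 11)) {
--             archivo[i+7]= "    else if (advance.between("+str(n_avances*2 +1)+", "+str(n_avances*3)+")) { \n"
--         # return constants.RANK.VETERAN;
--         # }
--         # else if (advance.between(12, 15)) {
--             archivo[i+10]= "    else if (advance.between("+str(n_avances*3 + 1)+", "+str(n_avances*4 )+")) { \n"
--         # return constants.RANK.HEROIC;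
--         # }
--         # else {
--         # return constants.RANK.LEGENDARY;
--         # }
--         else :      # Opcion por defecto
--             archivo[i+1]= "    if (advance <= 3) { \n"
--             archivo[i+4]= "    else if (advance.between(4, 7)) { \n"
--             archivo[i+7]= "    else if (advance.between(8, 11)) { \n"
--             archivo[i+10]= "    else if (advance.between(12, 15)) { \n"
--     return archivo
-- ===== SOURCE B (Python) =====
-- def _line(n_avances, d):
--     # d = offset from the header line: 1 -> the "if" line, 4/7/10 -> the k-th "else if" line (k = d//3)
--     if d == 1:
--         return "    if (advance <= " + str(n_avances if n_avances != 0 else 3) + ") { \n"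
--     k = d // 3
--     if n_avances != 0:
--         lo, hi = n_avances * k + 1, n_avances * (k + 1)
--     else:
--         lo, hi = 4 * k, 4 * k + 3
--     return "    else if (advance.between(" + str(lo) + ", " + str(hi) + ")) { \n"
--
--
-- def cambiar_avance(archivo, n_avances=0):
--     i = next((k for k, s in enumerate(archivo)
--               if s.strip().startswith("function getRankFromAdvance")), 0)
--     if i == 0:
--         return archivo
--     return [_line(n_avances, j - i) if j - i in (1, 4, 7, 10) else s
--             for j, s in enumerate(archivo)]
-- ===== Notes on version B (the rewrite author's own statement) =====
-- stated objective: simpler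
-- what changed: A's two duplicated four-assignment branches and manual index loop are replaced by one scan for the header line and a single formula-driven list rebuild (offset d -> line via d//3), with no in-place mutation.
import Mathlib
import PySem

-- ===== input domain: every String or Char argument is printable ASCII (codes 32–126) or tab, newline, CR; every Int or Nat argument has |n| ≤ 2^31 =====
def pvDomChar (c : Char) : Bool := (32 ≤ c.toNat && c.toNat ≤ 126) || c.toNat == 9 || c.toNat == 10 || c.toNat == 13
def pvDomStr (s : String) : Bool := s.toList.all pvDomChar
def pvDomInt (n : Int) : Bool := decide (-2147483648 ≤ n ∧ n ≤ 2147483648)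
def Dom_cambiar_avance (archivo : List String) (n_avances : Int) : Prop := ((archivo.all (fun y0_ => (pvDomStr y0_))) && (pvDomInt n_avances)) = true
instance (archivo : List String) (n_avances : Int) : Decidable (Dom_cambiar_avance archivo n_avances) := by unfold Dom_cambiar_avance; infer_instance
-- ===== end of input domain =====

-- B replaces A's duplicated threshold branches by one scan for the header line plus a single
-- formula-driven rebuild of the list (objective: simpler). A mutates `archivo` in place and
-- returns it; B builds a fresh list — the equivalence proved here is about the RETURN value only.

-- shared predicate: the Python condition archivo[i].strip().startswith("function getRankFromAdvance")
def pvPred (s : String) : Bool := PySem.Str.startswith (PySem.Str.strip s) "function getRankFromAdvance"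

-- ===== PORT A =====
-- A's search loop: for i in range(len(archivo)): if pred: n_linea = i; break
-- (final state: some i on break, none when no line matches, in which case n_linea = 0)
def pvAFind : List String → Nat → Option Nat
  | [], _ => none
  | s :: rest, i => if pvPred s then some i else pvAFind rest (i + 1)

-- Python raises IndexError on the assignments when i+10 ≥ len(archivo); Pre_ excludes that,
-- so the out-of-range no-op of List.set is never reached on admitted inputs.
def cambiar_avance (archivo : List String) (n_avances : Int) : List String :=
  match pvAFind archivo 0 with
  | none => archivo
  | some i =>
    if i ≠ 0 then
      if n_avances ≠ 0 then
        ((((archivo.set (i+1) ("    if (advance <= " ++ PySem.Int.toStr n_avances ++ ") { \n")).set (i+4)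
           ("    else if (advance.between(" ++ PySem.Int.toStr (n_avances + 1) ++ ", " ++ PySem.Int.toStr (n_avances * 2) ++ ")) { \n")).set (i+7)
           ("    else if (advance.between(" ++ PySem.Int.toStr (n_avances * 2 + 1) ++ ", " ++ PySem.Int.toStr (n_avances * 3) ++ ")) { \n")).set (i+10)
           ("    else if (advance.between(" ++ PySem.Int.toStr (n_avances * 3 + 1) ++ ", " ++ PySem.Int.toStr (n_avances * 4) ++ ")) { \n"))
      else
        ((((archivo.set (i+1) "    if (advance <= 3) { \n").set (i+4)
           "    else if (advance.between(4, 7)) { \n").set (i+7)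
           "    else if (advance.between(8, 11)) { \n").set (i+10)
           "    else if (advance.between(12, 15)) { \n")
    else archivo

-- ===== PORT B =====
-- Source B's _line helper
def pvLine (n_avances : Int) (d : Int) : String :=
  if d = 1 then
    "    if (advance <= " ++ PySem.Int.toStr (if n_avances ≠ 0 then n_avances else 3) ++ ") { \n"
  else
    let k := PySem.Int.floordiv d 3
    let lohi := if n_avances ≠ 0 then (n_avances * k + 1, n_avances * (k + 1)) else (4 * k, 4 * k + 3)
    "    else if (advance.between(" ++ PySem.Int.toStr lohi.1 ++ ", " ++ PySem.Int.toStr lohi.2 ++ ")) { \n"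

def cambiar_avance_alt (archivo : List String) (n_avances : Int) : List String :=
  let i : Int := ((((PySem.List.enumerate archivo 0).find? (fun p => pvPred p.2)).map (·.1)).getD 0)
  if i = 0 then archivo
  else
    (PySem.List.enumerate archivo 0).map (fun p =>
      if p.1 - i = 1 ∨ p.1 - i = 4 ∨ p.1 - i = 7 ∨ p.1 - i = 10 then pvLine n_avances (p.1 - i)
      else p.2)

-- ===== PRECONDITION & SPEC =====
-- Pre_ excludes exactly the inputs on which Python A raises IndexError: a matching header line
-- found at index i > 0 with fewer than 11 lines from it to the end of the file.
def Pre_cambiar_avance (archivo : List String) (n_avances : Int) : Prop :=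
  (archivo.findIdx? pvPred).all (fun j => j == 0 || j + 10 < archivo.length) = true
instance (archivo : List String) (n_avances : Int) : Decidable (Pre_cambiar_avance archivo n_avances) := by unfold Pre_cambiar_avance; infer_instance

def pvWitness_cambiar_avance : List String × Int :=
  (["x", "function getRankFromAdvance(a)", "a", "b", "c", "d", "e", "f", "g", "h", "i", "j"], 5)

def Spec_cambiar_avance (archivo : List String) (n_avances : Int) (out : List String) : Prop := out = cambiar_avance_alt archivo n_avances
instance (archivo : List String) (n_avances : Int) (out : List String) : Decidable (Spec_cambiar_avance archivo n_avances out) := by unfold Spec_cambiar_avance; infer_instance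

-- ===== CLAIM (what is proved, stated in full; the proofs are below) =====
def Claim_equal_cambiar_avance : Prop := ∀ (archivo : List String) (n_avances : Int), Dom_cambiar_avance archivo n_avances → Pre_cambiar_avance archivo n_avances → Spec_cambiar_avance archivo n_avances (cambiar_avance archivo n_avances)

-- ===== LEMMAS AND PROOFS =====

theorem pvAFind_eq (xs : List String) (k : Nat) :
    pvAFind xs k = (xs.findIdx? pvPred).map (· + k) := by
  induction xs generalizing k with
  | nil => simp [pvAFind]
  | cons x t ih =>
      by_cases h : pvPred x <;>
        simp [pvAFind, List.findIdx?_cons, h, ih, Option.map_map, Function.comp]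
      exact Option.map_congr (fun a _ => by omega)

theorem pvBFind_eq (xs : List String) (s : Int) :
    (((PySem.List.enumerate xs s).find? (fun p => pvPred p.2)).map (·.1)) =
      (xs.findIdx? pvPred).map (fun j => (j : Int) + s) := by
  induction xs generalizing s with
  | nil => simp [PySem.List.enumerate_nil]
  | cons x t ih =>
      by_cases h : pvPred x <;>
        simp [PySem.List.enumerate_cons, List.find?_cons, List.findIdx?_cons, h, ih,
          Option.map_map, Function.comp]
      cases List.findIdx? pvPred t <;> simp <;> push_cast <;> omega

-- ===== VERDICT (by name: the statement is the Claim_ definition above) =====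
theorem cambiar_avance_spec : Claim_equal_cambiar_avance := by
  intro archivo n_avances _hdom hpre
  unfold Spec_cambiar_avance cambiar_avance cambiar_avance_alt
  rw [pvAFind_eq]
  cases hfi : archivo.findIdx? pvPred with
  | none => simp [pvBFind_eq, hfi]
  | some j =>
      by_cases hj : j = 0
      · subst hj; simp [pvBFind_eq, hfi]
      · have hlen : j + 10 < archivo.length := by
          unfold Pre_cambiar_avance at hpre
          rw [hfi] at hpre
          simp at hpre
          rcases hpre with h | h
          · exact absurd h hj
          · exact h
        simp [pvBFind_eq, hfi, hj]
        refine List.ext_getElem ?_ ?_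
        · split_ifs <;> simp
        · intro m hA hB
          have hm : m < archivo.length := by
            by_cases hn : n_avances = 0 <;> simp [hn] at hA <;> omega
          simp only [List.getElem_map, PySem.List.getElem_enumerate]
          by_cases e1 : m = j + 1
          · subst e1
            have hd : ((0:Int) + (↑(j+1):Int)) - ↑j = 1 := by push_cast; ring
            by_cases hn : n_avances = 0 <;>
              simp [List.getElem_set, hd, pvLine, hn,
                show j+10 ≠ j+1 by omega, show j+7 ≠ j+1 by omega, show j+4 ≠ j+1 by omega] <;> decide
          · by_cases e4 : m = j + 4
            · subst e4
              have hd : ((0:Int) + (↑(j+4):Int)) - ↑j = 4 := by push_cast; ring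
              have hk : PySem.Int.floordiv 4 3 = 1 := by decide
              have r1 : n_avances * 1 + 1 = n_avances + 1 := by ring
              have r2 : n_avances * (1+1) = n_avances * 2 := by ring
              by_cases hn : n_avances = 0 <;>
                simp [List.getElem_set, hd, pvLine, hn, hk, r1, r2,
                  show j+10 ≠ j+4 by omega, show j+7 ≠ j+4 by omega, show j+1 ≠ j+4 by omega] <;> decide
            · by_cases e7 : m = j + 7
              · subst e7
                have hd : ((0:Int) + (↑(j+7):Int)) - ↑j = 7 := by push_cast; ring
                have hk : PySem.Int.floordiv 7 3 = 2 := by decide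
                have r2 : n_avances * (2+1) = n_avances * 3 := by ring
                by_cases hn : n_avances = 0 <;>
                  simp [List.getElem_set, hd, pvLine, hn, hk, r2,
                    show j+10 ≠ j+7 by omega, show j+4 ≠ j+7 by omega, show j+1 ≠ j+7 by omega] <;> decide
              · by_cases e10 : m = j + 10
                · subst e10
                  have hd : ((0:Int) + (↑(j+10):Int)) - ↑j = 10 := by push_cast; ring
                  have hk : PySem.Int.floordiv 10 3 = 3 := by decide
                  have r2 : n_avances * (3+1) = n_avances * 4 := by ring
                  by_cases hn : n_avances = 0 <;>
                    simp [List.getElem_set, hd, pvLine, hn, hk, r2,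
                      show j+7 ≠ j+10 by omega, show j+4 ≠ j+10 by omega, show j+1 ≠ j+10 by omega] <;> decide
                · have hd : ¬(((m:Int)) - ↑j = 1 ∨ ((m:Int)) - ↑j = 4 ∨
                      ((m:Int)) - ↑j = 7 ∨ ((m:Int)) - ↑j = 10) := by
                    push_cast
                    omega
                  by_cases hn : n_avances = 0 <;>
                    simp [List.getElem_set, hd, hn,
                      show j+1 ≠ m from fun h => e1 h.symm, show j+4 ≠ m from fun h => e4 h.symm,
                      show j+7 ≠ m from fun h => e7 h.symm, show j+10 ≠ m from fun h => e10 h.symm]
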